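-- pv_equiv track=rewrite | github.com/Viktor-Shcheglov/Code_Samples | CodeSamples/PlagarismDetector.py | CreateOriginalSet
-- ===== SOURCE A (Python) =====
-- def CreateOriginalSet(inputs,tupleSize,SynonymsDictionary):
-- 	"""
-- 	Will go through the original text spliting all the words and then using the alphabet to remove any remaining punctuation. Assumes that there are no quotes in the text and proper use of white space.
-- 	Creates a set of all possible combination of tupples and return the set.
-- 	"""
-- 	inputs = inputs.split()
-- 	alphabet={'a','b','c','d','e','f','g','h','i','j','k','l','m','n','o','p','q','r','s','t','u','v','w','x','y','z','1','2','3','4','5','6','7','8','9','0'}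
-- 	OriginalSet = set()
-- 	tempTuple = []
-- 	for word in inputs:
-- 		tempword= word.lower()
-- 		templist = []
-- 		for char in tempword:
-- 			if char in alphabet:
-- 				templist.append(char)
-- 		if len(templist)>0:
-- 			tempword = ''.join(templist)
-- 			if tempword in SynonymsDictionary:
-- 				tempword = SynonymsDictionary[tempword]
-- 			tempTuple.append(tempword)
-- 			if len(tempTuple)==tupleSize:
-- 				OriginalSet.add(tuple(tempTuple))
-- 				tempTuple.pop(0)
-- 	return OriginalSet
-- ===== SOURCE B (Python) =====
-- ALPHABET = set('abcdefghijklmnopqrstuvwxyz1234567890')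
--
-- def _clean(word, SynonymsDictionary):
--     """Lowercase, strip non-alphanumerics; None if nothing is left, else the synonym substitute."""
--     w = ''.join(c for c in word.lower() if c in ALPHABET)
--     if not w:
--         return None
--     return SynonymsDictionary.get(w, w)
--
-- def CreateOriginalSet(inputs, tupleSize, SynonymsDictionary):
--     cleaned = [c for c in (_clean(w, SynonymsDictionary) for w in inputs.split()) if c is not None]
--     if tupleSize < 1:
--         return set()
--     return {tuple(cleaned[i:i + tupleSize]) for i in range(len(cleaned) - tupleSize + 1)}
-- ===== Notes on version B (the rewrite author's own statement) =====
-- stated objective: simpler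
-- what changed: B first builds the list of cleaned words in one pass, then forms the n-gram set by index-slicing windows, replacing A's interleaved append/pop-front sliding buffer inside the cleaning loop.
import Mathlib
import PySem

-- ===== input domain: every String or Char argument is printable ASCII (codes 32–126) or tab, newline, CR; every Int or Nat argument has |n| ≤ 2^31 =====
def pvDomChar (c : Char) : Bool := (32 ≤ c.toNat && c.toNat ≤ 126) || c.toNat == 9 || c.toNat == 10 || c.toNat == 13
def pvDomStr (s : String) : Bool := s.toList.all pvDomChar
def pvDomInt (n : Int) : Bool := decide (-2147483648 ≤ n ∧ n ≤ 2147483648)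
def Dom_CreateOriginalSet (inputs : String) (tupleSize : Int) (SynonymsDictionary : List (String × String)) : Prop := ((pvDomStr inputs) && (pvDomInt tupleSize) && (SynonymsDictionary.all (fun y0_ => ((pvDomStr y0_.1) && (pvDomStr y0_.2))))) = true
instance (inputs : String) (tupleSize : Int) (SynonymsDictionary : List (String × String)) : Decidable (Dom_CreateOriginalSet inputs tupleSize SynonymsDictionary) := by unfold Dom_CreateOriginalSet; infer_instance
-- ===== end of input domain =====

-- B precomputes the cleaned word list and slices n-gram windows by index instead of
-- maintaining A's append/pop-front buffer inside the cleaning loop (objective: simpler).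

-- the Python set literal 'alphabet' (used by both programs)
def pvAlphabet : PySem.Set Char :=
  PySem.Set.ofList "abcdefghijklmnopqrstuvwxyz1234567890".toList

-- ===== PORT A =====
def CreateOriginalSet (inputs : String) (tupleSize : Int) (SynonymsDictionary : List (String × String)) : List (List String) :=
  let words := PySem.Str.split₀ inputs
  let st := words.foldl (fun (st : List (List String) × List String) word =>
      let tempword := PySem.Str.lower word
      let templist := tempword.toList.foldl
        (fun acc c => if PySem.Set.contains pvAlphabet c then acc ++ [c] else acc) ([] : List Char)
      if templist.length > 0 then
        let tw := String.ofList templist                -- ''.join(templist)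
        let tw2 := if PySem.Dict.contains (PySem.Dict.mk SynonymsDictionary) tw
                   then (PySem.Dict.get? (PySem.Dict.mk SynonymsDictionary) tw).getD tw
                   else tw
        let buf := st.2 ++ [tw2]                        -- tempTuple.append
        if (buf.length : Int) = tupleSize then (PySem.Set.add st.1 buf, buf.tail)  -- add + pop(0)
        else (st.1, buf)
      else st)
    ((PySem.Set.empty : PySem.Set (List String)), ([] : List String))
  st.1

-- ===== PORT B =====
-- Source B's _clean: None if nothing is left after filtering, else the synonym substitute
def pvClean (SynonymsDictionary : List (String × String)) (word : String) : Option String :=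
  let cs := (PySem.Str.lower word).toList.filter (fun c => PySem.Set.contains pvAlphabet c)
  if cs = [] then none
  else
    let w := String.ofList cs
    some ((PySem.Dict.get? (PySem.Dict.mk SynonymsDictionary) w).getD w)   -- dict.get(w, w)

def CreateOriginalSet_alt (inputs : String) (tupleSize : Int) (SynonymsDictionary : List (String × String)) : List (List String) :=
  let cleaned := (PySem.Str.split₀ inputs).filterMap (pvClean SynonymsDictionary)
  if tupleSize < 1 then PySem.Set.empty
  else PySem.Set.ofList
    ((PySem.List.pyRange 0 ((cleaned.length : Int) - tupleSize + 1) 1).map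
      (fun i => PySem.List.slice cleaned (some i) (some (i + tupleSize))))

-- ===== PRECONDITION & SPEC =====
def Spec_CreateOriginalSet (inputs : String) (tupleSize : Int) (SynonymsDictionary : List (String × String)) (out : List (List String)) : Prop := out = CreateOriginalSet_alt inputs tupleSize SynonymsDictionary
instance (inputs : String) (tupleSize : Int) (SynonymsDictionary : List (String × String)) (out : List (List String)) : Decidable (Spec_CreateOriginalSet inputs tupleSize SynonymsDictionary out) := by unfold Spec_CreateOriginalSet; infer_instance

-- ===== CLAIM (what is proved, stated in full; the proofs are below) =====
def Claim_equal_CreateOriginalSet : Prop := ∀ (inputs : String) (tupleSize : Int) (SynonymsDictionary : List (String × String)), Dom_CreateOriginalSet inputs tupleSize SynonymsDictionary → Spec_CreateOriginalSet inputs tupleSize SynonymsDictionary (CreateOriginalSet inputs tupleSize SynonymsDictionary)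

-- ===== LEMMAS AND PROOFS =====

-- the sliding windows of size k over l, front to back
def pvWindows (k : Nat) (l : List String) : List (List String) :=
  (List.range (l.length + 1 - k)).map (fun i => (l.drop i).take k)

-- A's per-cleaned-word core step (what A's loop body does when the cleaned word is non-empty)
def pvCore (tupleSize : Int) (st : List (List String) × List String) (cw : String) :
    List (List String) × List String :=
  let buf := st.2 ++ [cw]
  if (buf.length : Int) = tupleSize then (PySem.Set.add st.1 buf, buf.tail) else (st.1, buf)

-- A's loop body equals: skip if the word cleans to nothing, else the core step on the cleaned word
lemma pvStep_eq (tupleSize : Int) (syn : List (String × String))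
    (st : List (List String) × List String) (word : String) :
    (let tempword := PySem.Str.lower word
     let templist := tempword.toList.foldl
       (fun acc c => if PySem.Set.contains pvAlphabet c then acc ++ [c] else acc) ([] : List Char)
     if templist.length > 0 then
       let tw := String.ofList templist
       let tw2 := if PySem.Dict.contains (PySem.Dict.mk syn) tw
                  then (PySem.Dict.get? (PySem.Dict.mk syn) tw).getD tw
                  else tw
       let buf := st.2 ++ [tw2]
       if (buf.length : Int) = tupleSize then (PySem.Set.add st.1 buf, buf.tail)
       else (st.1, buf)
     else st)
    = (match pvClean syn word with
       | none => st
       | some cw => pvCore tupleSize st cw) := by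
  simp only [PySem.List.foldl_append_if_eq_filter, List.nil_append]
  unfold pvClean
  by_cases h : (PySem.Str.lower word).toList.filter (fun c => PySem.Set.contains pvAlphabet c) = []
  · rw [h]; simp
  · have hlen : 0 < ((PySem.Str.lower word).toList.filter (fun c => PySem.Set.contains pvAlphabet c)).length := by
      cases hx : (PySem.Str.lower word).toList.filter (fun c => PySem.Set.contains pvAlphabet c) with
      | nil => exact absurd hx h
      | cons a b => simp
    rw [if_neg h, if_pos hlen]
    show _ = pvCore tupleSize st _
    unfold pvCore
    by_cases hc : PySem.Dict.contains (PySem.Dict.mk syn)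
        (String.ofList ((PySem.Str.lower word).toList.filter (fun c => PySem.Set.contains pvAlphabet c))) = true
    · rw [if_pos hc]
    · have hn : PySem.Dict.get? (PySem.Dict.mk syn)
          (String.ofList ((PySem.Str.lower word).toList.filter (fun c => PySem.Set.contains pvAlphabet c))) = none := by
        cases hg : PySem.Dict.get? (PySem.Dict.mk syn)
            (String.ofList ((PySem.Str.lower word).toList.filter (fun c => PySem.Set.contains pvAlphabet c))) with
        | none => rfl
        | some v =>
            exfalso
            rw [PySem.Dict.contains_eq_isSome_get?, hg] at hc
            simp at hc
      rw [if_neg hc, hn]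
      rfl

-- A's word loop is the core loop over the cleaned (filterMapped) words
lemma pvFoldl_eq_core (tupleSize : Int) (syn : List (String × String))
    (words : List String) (st : List (List String) × List String) :
    words.foldl (fun (st : List (List String) × List String) word =>
      let tempword := PySem.Str.lower word
      let templist := tempword.toList.foldl
        (fun acc c => if PySem.Set.contains pvAlphabet c then acc ++ [c] else acc) ([] : List Char)
      if templist.length > 0 then
        let tw := String.ofList templist
        let tw2 := if PySem.Dict.contains (PySem.Dict.mk syn) tw
                   then (PySem.Dict.get? (PySem.Dict.mk syn) tw).getD tw
                   else tw
        let buf := st.2 ++ [tw2]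
        if (buf.length : Int) = tupleSize then (PySem.Set.add st.1 buf, buf.tail)
        else (st.1, buf)
      else st) st
    = (words.filterMap (pvClean syn)).foldl (pvCore tupleSize) st := by
  induction words generalizing st with
  | nil => rfl
  | cons w t ih =>
      rw [List.foldl_cons, pvStep_eq tupleSize syn st w]
      cases hcw : pvClean syn w with
      | none => simp only [List.filterMap_cons, hcw]; exact ih _
      | some cw => simp only [List.filterMap_cons, hcw, List.foldl_cons]; exact ih _

lemma pvWindows_nil_of_short (kN : Nat) (l : List String) (h : l.length < kN) :
    pvWindows kN l = [] := by
  unfold pvWindows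
  have : l.length + 1 - kN = 0 := by omega
  simp [this]

lemma pvWindows_cons (kN : Nat) (l : List String) (hk : 1 ≤ kN) (h : kN ≤ l.length) :
    pvWindows kN l = l.take kN :: pvWindows kN l.tail := by
  unfold pvWindows
  have hl : l.length + 1 - kN = (l.tail.length + 1 - kN) + 1 := by
    cases l with
    | nil => simp at h; omega
    | cons a t => simp only [List.length_cons, List.tail_cons] at h ⊢; omega
  rw [hl, List.range_succ_eq_map, List.map_cons, List.map_map]
  congr 1
  apply List.map_congr_left
  intro i _
  show (l.drop (i + 1)).take kN = (l.tail.drop i).take kN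
  rw [List.drop_tail]

lemma pvCore_run_pos (kN : Nat) (hk : 1 ≤ kN) (cs : List String) :
    ∀ (buf : List String) (S : List (List String)), buf.length < kN →
      (cs.foldl (pvCore (kN : Int)) (S, buf)).1
        = (pvWindows kN (buf ++ cs)).foldl PySem.Set.add S := by
  induction cs with
  | nil =>
      intro buf S hb
      rw [List.append_nil, pvWindows_nil_of_short kN buf hb]
      rfl
  | cons x t ih =>
      intro buf S hb
      have hsplit : buf ++ x :: t = (buf ++ [x]) ++ t := by simp
      rw [List.foldl_cons]
      show ((t.foldl (pvCore (kN : Int)) (pvCore (kN : Int) (S, buf) x))).1 = _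
      by_cases h : (buf ++ [x]).length = kN
      · have hc1 : ((buf.length : Int) + 1 = (kN : Int)) := by
          have hb1 : buf.length + 1 = kN := by simpa using h
          exact_mod_cast hb1
        have htail : (buf ++ [x]).tail.length < kN := by
          rw [List.length_tail]; simp; omega
        rw [show pvCore (kN : Int) (S, buf) x
              = (PySem.Set.add S (buf ++ [x]), (buf ++ [x]).tail) by
            simp [pvCore, hc1]]
        rw [ih _ _ htail, hsplit]
        rw [pvWindows_cons kN ((buf ++ [x]) ++ t) hk (by simp [← h])]
        have h1 : ((buf ++ [x]) ++ t).take kN = buf ++ [x] := by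
          rw [← h]; exact List.take_left
        have h2 : ((buf ++ [x]) ++ t).tail = (buf ++ [x]).tail ++ t := by
          cases hbx : buf ++ [x] with
          | nil => simp at hbx
          | cons a r => rw [List.cons_append, List.tail_cons, List.tail_cons]
        rw [h1, h2, List.foldl_cons]
      · have hc1 : ¬ ((buf.length : Int) + 1 = (kN : Int)) := by
          have hb1 : ¬ (buf.length + 1 = kN) := by simpa using h
          exact_mod_cast hb1
        have hlt : (buf ++ [x]).length < kN := by
          have hl : (buf ++ [x]).length = buf.length + 1 := by simp
          omega
        rw [show pvCore (kN : Int) (S, buf) x = (S, buf ++ [x]) by simp [pvCore, hc1]]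
        rw [ih _ _ hlt, hsplit]

lemma pvCore_run_nonpos (tupleSize : Int) (hk : tupleSize < 1) (cs : List String) :
    ∀ (buf : List String) (S : List (List String)),
      (cs.foldl (pvCore tupleSize) (S, buf)).1 = S := by
  induction cs with
  | nil => intro buf S; rfl
  | cons x t ih =>
      intro buf S
      have h : ¬ (((buf.length : Int) + 1) = tupleSize) := by omega
      rw [List.foldl_cons]
      show ((t.foldl (pvCore tupleSize) (pvCore tupleSize (S, buf) x))).1 = S
      rw [show pvCore tupleSize (S, buf) x = (S, buf ++ [x]) by simp [pvCore, h]]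
      exact ih _ _

lemma pvWindows_eq_slices (kN : Nat) (cleaned : List String) :
    pvWindows kN cleaned
      = (PySem.List.pyRange 0 ((cleaned.length : Int) - (kN : Int) + 1) 1).map
          (fun i => PySem.List.slice cleaned (some i) (some (i + (kN : Int)))) := by
  unfold pvWindows
  rw [PySem.List.pyRange_one, List.map_map]
  have hn : ((cleaned.length : Int) - (kN : Int) + 1 - 0).toNat = cleaned.length + 1 - kN := by
    omega
  rw [hn]
  apply List.map_congr_left
  intro i _
  show (cleaned.drop i).take kN
      = PySem.List.slice cleaned (some (0 + (i : Int))) (some (0 + (i : Int) + (kN : Int)))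
  rw [zero_add, PySem.List.slice_natCast_add]

-- ===== VERDICT (by name: the statement is the Claim_ definition above) =====
theorem CreateOriginalSet_spec : Claim_equal_CreateOriginalSet := by
  intro inputs tupleSize syn _
  unfold Spec_CreateOriginalSet CreateOriginalSet CreateOriginalSet_alt
  dsimp only
  rw [pvFoldl_eq_core]
  by_cases hk : tupleSize < 1
  · rw [if_pos hk]
    exact pvCore_run_nonpos tupleSize hk _ _ _
  · rw [if_neg hk]
    have hk1 : 1 ≤ tupleSize.toNat := by omega
    have hcast : tupleSize = ((tupleSize.toNat : Int)) := by omega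
    rw [hcast, pvCore_run_pos tupleSize.toNat hk1 _ _ _ (by show 0 < tupleSize.toNat; omega : ([] : List String).length < tupleSize.toNat)]
    rw [List.nil_append, pvWindows_eq_slices tupleSize.toNat]
    rw [PySem.Set.ofList_eq_foldl]
    rfl
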